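-- pv_equiv track=rewrite | github.com/StanfordVL/behavioral_navigation_nlp | codes/utils.py | convert_map
-- ===== SOURCE A (Python) =====
-- import collections
--
-- EDGES = ['oor', 'ool', 'oio', 'lt', 'rt', 'sp', 'chs', 'chr', 'chl', 'cf', 'iol', 'ior']
--
-- def split_triplet(triplet_str):
--     elements = triplet_str.split(' ')
--     first_node = []
--     edge = []
--     second_node = []
--     attribute = ''
--     if '(' in elements:
--         start, end = elements.index('('), elements.index(')')
--         attribute = " ".join(elements[start: end + 1])
--         elements = elements[:start] + elements[end + 1:]
--     for ele in elements:
--         if ele in EDGES: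
--             edge.append(ele)
--         elif not edge:
--             first_node.append(ele)
--         else:
--             second_node.append(ele)
--     assert len(edge) == 1, "edge should only contain one element {}".format(elements)
--     return " ".join(first_node), " ".join(edge), " ".join(second_node)
--
-- def convert_map(graph):
--     tidied_map = collections.defaultdict(dict)
--     for triplet in graph.strip().split(';'):
--         triplet = triplet.strip()
--         if not triplet:
--             continue
--         start, edge, end = split_triplet(triplet)
--         start, edge, end = start.strip(), edge.strip(), end.strip()
--         tidied_map[start][edge] = end
--     return tidied_map
-- ===== SOURCE B (Python) =====
-- EDGES = ['oor', 'ool', 'oio', 'lt', 'rt', 'sp', 'chs', 'chr', 'chl', 'cf', 'iol', 'ior']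
--
-- def convert_map(graph):
--     result = {}
--     for part in graph.strip().split(';'):
--         triplet = part.strip()
--         if not triplet:
--             continue
--         elements = triplet.split(' ')
--         if '(' in elements:
--             s, e = elements.index('('), elements.index(')')
--             elements = elements[:s] + elements[e + 1:]
--         positions = [i for i, ele in enumerate(elements) if ele in EDGES]
--         assert len(positions) == 1, "edge should only contain one element {}".format(elements)
--         i = positions[0]
--         start = " ".join(elements[:i]).strip()
--         end = " ".join(elements[i + 1:]).strip()
--         result.setdefault(start, {})[elements[i]] = end
--     return result
-- ===== Notes on version B (the rewrite author's own statement) =====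
-- stated objective: simpler
-- what changed: Replaces A's helper split_triplet with its stateful three-accumulator classification loop by an inline parse that collects the positions of EDGES tokens in one comprehension, asserts there is exactly one, and recovers the three parts by slicing around that index; the nested dict is built with setdefault instead of defaultdict.
import Mathlib
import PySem

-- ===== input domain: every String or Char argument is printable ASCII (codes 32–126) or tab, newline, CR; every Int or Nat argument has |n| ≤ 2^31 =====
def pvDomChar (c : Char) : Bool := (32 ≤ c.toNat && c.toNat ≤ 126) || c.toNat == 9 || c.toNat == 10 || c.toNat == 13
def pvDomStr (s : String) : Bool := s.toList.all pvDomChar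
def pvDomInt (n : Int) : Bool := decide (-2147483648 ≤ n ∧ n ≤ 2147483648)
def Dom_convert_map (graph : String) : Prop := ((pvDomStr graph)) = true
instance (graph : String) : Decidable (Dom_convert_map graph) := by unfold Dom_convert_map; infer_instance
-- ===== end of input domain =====

-- B parses each triplet by locating the unique edge token's position and slicing around it,
-- instead of A's stateful three-accumulator classification loop; objective: simpler (same cost).

-- ===== PORT A =====
-- s.split(sep) for a NONEMPTY separator (split? is none only for sep = ""; only ";" and " " occur below)
def pySplit (s sep : String) : List String := (PySem.Str.split? s sep).getD []

def EDGES : List String :=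
  ["oor", "ool", "oio", "lt", "rt", "sp", "chs", "chr", "chl", "cf", "iol", "ior"]

-- port of A's split_triplet (where Python raises — ValueError when '(' is present but ')'
-- is not, AssertionError when the edge accumulator has length ≠ 1 — the input is excluded
-- by Pre_convert_map; the port just carries on)
def split_triplet (t : String) : String × String × String :=
  let elements := pySplit t " "
  let elements :=
    if elements.contains "(" then
      match PySem.List.index? elements "(", PySem.List.index? elements ")" with
      | some s, some e =>
          PySem.List.slice elements (some (0 : Int)) (some (s : Int)) ++
            PySem.List.slice elements (some ((e : Int) + 1)) none
      | _, _ => elements      -- Python: ValueError (')' absent); outside Pre_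
    else elements
  let acc := elements.foldl
    (fun (acc : List String × List String × List String) ele =>
      if EDGES.contains ele then (acc.1, acc.2.1 ++ [ele], acc.2.2)
      else if acc.2.1.isEmpty then (acc.1 ++ [ele], acc.2.1, acc.2.2)
      else (acc.1, acc.2.1, acc.2.2 ++ [ele]))
    ([], [], [])
  (PySem.Str.join " " acc.1, PySem.Str.join " " acc.2.1, PySem.Str.join " " acc.2.2)

def convert_map (graph : String) : List (String × List (String × String)) :=
  (((pySplit (PySem.Str.strip graph) ";").foldl
    (fun (d : PySem.Dict String (PySem.Dict String String)) trip =>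
      let t := PySem.Str.strip trip
      if t = "" then d
      else
        let r := split_triplet t
        let s := PySem.Str.strip r.1
        let e := PySem.Str.strip r.2.1
        let en := PySem.Str.strip r.2.2
        d.insert s ((d.getD s PySem.Dict.empty).insert e en))
    PySem.Dict.empty).items).map (fun p => (p.1, p.2.items))

-- ===== PORT B =====
def convert_map_alt (graph : String) : List (String × List (String × String)) :=
  (((pySplit (PySem.Str.strip graph) ";").foldl
    (fun (result : PySem.Dict String (PySem.Dict String String)) part =>
      let triplet := PySem.Str.strip part
      if triplet = "" then result
      else
        let elements := pySplit triplet " "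
        let elements :=
          if elements.contains "(" then
            match PySem.List.index? elements "(", PySem.List.index? elements ")" with
            | some s, some e =>
                PySem.List.slice elements (some (0 : Int)) (some (s : Int)) ++
                  PySem.List.slice elements (some ((e : Int) + 1)) none
            | _, _ => elements      -- Python: ValueError; outside Pre_
          else elements
        let positions := (PySem.List.enumerate elements 0).filterMap
          (fun p => if EDGES.contains p.2 then some p.1 else none)
        if positions.length = 1 then    -- Source B: assert len(positions) == 1
          let i := (positions[0]?).getD 0
          let start := PySem.Str.strip (PySem.Str.join " " (PySem.List.slice elements none (some i)))
          let en := PySem.Str.strip (PySem.Str.join " " (PySem.List.slice elements (some (i + 1)) none))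
          let edge := (PySem.List.pyGet? elements i).getD ""   -- elements[i]; i is in range here
          result.modify start PySem.Dict.empty (fun inner => inner.insert edge en)
        else result)                    -- Python: AssertionError; outside Pre_
    PySem.Dict.empty).items).map (fun p => (p.1, p.2.items))

-- ===== PRECONDITION & SPEC =====
-- the paren-removal step both Pythons apply before looking for the edge token
def parenRemoved (el : List String) : List String :=
  if el.contains "(" then
    match PySem.List.index? el "(", PySem.List.index? el ")" with
    | some s, some e =>
        PySem.List.slice el (some (0 : Int)) (some (s : Int)) ++
          PySem.List.slice el (some ((e : Int) + 1)) none
    | _, _ => el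
  else el

-- Pre_ excludes exactly the inputs on which Python A raises: some nonempty triplet whose token
-- list has '(' but no ')' (ValueError), or whose paren-removed token list does not contain
-- exactly one EDGES token (AssertionError).
def Pre_convert_map (graph : String) : Prop :=
  ∀ t ∈ pySplit (PySem.Str.strip graph) ";",
    PySem.Str.strip t ≠ "" →
      ((pySplit (PySem.Str.strip t) " ").contains "(" = true →
        (pySplit (PySem.Str.strip t) " ").contains ")" = true) ∧
      (parenRemoved (pySplit (PySem.Str.strip t) " ")).countP
        (fun e => EDGES.contains e) = 1

instance (graph : String) : Decidable (Pre_convert_map graph) := by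
  unfold Pre_convert_map; infer_instance

def pvWitness_convert_map : String := "a room oor b ; b lt c hall ( x ) ; b oor a"

def Spec_convert_map (graph : String) (out : List (String × List (String × String))) : Prop := out = convert_map_alt graph
instance (graph : String) (out : List (String × List (String × String))) : Decidable (Spec_convert_map graph out) := by unfold Spec_convert_map; infer_instance

-- ===== CLAIM (what is proved, stated in full; the proofs are below) =====
def Claim_equal_convert_map : Prop := ∀ (graph : String), Dom_convert_map graph → Pre_convert_map graph → Spec_convert_map graph (convert_map graph)

-- ===== LEMMAS AND PROOFS =====

-- a list with countP = 1 splits as pre ++ x :: suf with the hit exactly at x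
theorem countP_one_decomp {α : Type} (p : α → Bool) :
    ∀ (l : List α), l.countP p = 1 →
      ∃ pre x suf, l = pre ++ x :: suf ∧ p x = true ∧
        (∀ a ∈ pre, p a = false) ∧ (∀ a ∈ suf, p a = false) := by
  intro l
  induction l with
  | nil => intro h; simp at h
  | cons a l ih =>
    intro h
    by_cases hp : p a = true
    · refine ⟨[], a, l, by simp, hp, by simp, ?_⟩
      rw [List.countP_cons, hp] at h
      simp at h
      intro b hb
      simpa using h b hb
    · rw [List.countP_cons, if_neg (by simpa using hp)] at h
      simp at h
      obtain ⟨pre, x, suf, hl, hx, hpre, hsuf⟩ := ih h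
      refine ⟨a :: pre, x, suf, by simp [hl], hx, ?_, hsuf⟩
      intro b hb
      rcases List.mem_cons.mp hb with rfl | hb
      · simpa using hp
      · exact hpre b hb

-- A's classification fold, phase 2: edge already found, non-edge tokens go to second_node
theorem foldA_after (suf : List String) :
    (∀ a ∈ suf, EDGES.contains a = false) →
    ∀ (fn eg sn : List String), eg ≠ [] →
      suf.foldl
        (fun (acc : List String × List String × List String) ele =>
          if EDGES.contains ele then (acc.1, acc.2.1 ++ [ele], acc.2.2)
          else if acc.2.1.isEmpty then (acc.1 ++ [ele], acc.2.1, acc.2.2)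
          else (acc.1, acc.2.1, acc.2.2 ++ [ele]))
        (fn, eg, sn) = (fn, eg, sn ++ suf) := by
  induction suf with
  | nil => intro _ fn eg sn _; simp
  | cons a suf ih =>
    intro hsuf fn eg sn heg
    have ha : EDGES.contains a = false := hsuf a (by simp)
    have hne : eg.isEmpty = false := by
      cases eg with
      | nil => exact absurd rfl heg
      | cons _ _ => rfl
    simp only [List.foldl_cons, ha, Bool.false_eq_true, if_false, hne]
    rw [ih (fun b hb => hsuf b (by simp [hb])) fn eg (sn ++ [a]) heg]
    simp

-- A's classification fold, phase 1: no edge seen yet, non-edge tokens go to first_node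
theorem foldA_before (pre : List String) :
    (∀ a ∈ pre, EDGES.contains a = false) →
    ∀ (fn rest : List String),
      (pre ++ rest).foldl
        (fun (acc : List String × List String × List String) ele =>
          if EDGES.contains ele then (acc.1, acc.2.1 ++ [ele], acc.2.2)
          else if acc.2.1.isEmpty then (acc.1 ++ [ele], acc.2.1, acc.2.2)
          else (acc.1, acc.2.1, acc.2.2 ++ [ele]))
        (fn, [], []) =
      rest.foldl
        (fun (acc : List String × List String × List String) ele =>
          if EDGES.contains ele then (acc.1, acc.2.1 ++ [ele], acc.2.2)
          else if acc.2.1.isEmpty then (acc.1 ++ [ele], acc.2.1, acc.2.2)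
          else (acc.1, acc.2.1, acc.2.2 ++ [ele]))
        (fn ++ pre, [], []) := by
  induction pre with
  | nil => intro _ fn rest; simp
  | cons a pre ih =>
    intro hpre fn rest
    have ha : EDGES.contains a = false := hpre a (by simp)
    simp only [List.cons_append, List.foldl_cons, ha, Bool.false_eq_true, if_false,
      List.isEmpty_nil, if_true]
    rw [ih (fun b hb => hpre b (by simp [hb])) (fn ++ [a]) rest]
    simp

-- A's fold on pre ++ x :: suf (one edge token, at x) yields (pre, [x], suf)
theorem foldA_decomp (pre suf : List String) (x : String)
    (hpre : ∀ a ∈ pre, EDGES.contains a = false)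
    (hx : EDGES.contains x = true)
    (hsuf : ∀ a ∈ suf, EDGES.contains a = false) :
    (pre ++ x :: suf).foldl
      (fun (acc : List String × List String × List String) ele =>
        if EDGES.contains ele then (acc.1, acc.2.1 ++ [ele], acc.2.2)
        else if acc.2.1.isEmpty then (acc.1 ++ [ele], acc.2.1, acc.2.2)
        else (acc.1, acc.2.1, acc.2.2 ++ [ele]))
      ([], [], []) = (pre, [x], suf) := by
  rw [foldA_before pre hpre [] (x :: suf)]
  simp only [List.foldl_cons, hx, if_true, List.nil_append]
  exact foldA_after suf hsuf pre [x] [] (by simp)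

-- B's position comprehension over a stretch without edge tokens is empty
theorem positions_none (l : List String) :
    (∀ a ∈ l, EDGES.contains a = false) →
    ∀ (s : Int),
      (PySem.List.enumerate l s).filterMap
        (fun p => if EDGES.contains p.2 then some p.1 else none) = [] := by
  induction l with
  | nil => intro _ s; simp [PySem.List.enumerate_nil]
  | cons a l ih =>
    intro hl s
    rw [PySem.List.enumerate_cons]
    simp only [List.filterMap_cons, hl a (by simp), Bool.false_eq_true, if_false]
    exact ih (fun b hb => hl b (by simp [hb])) (s + 1)

-- B's position comprehension on pre ++ x :: suf is exactly [pre.length]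
theorem positions_decomp (pre suf : List String) (x : String)
    (hpre : ∀ a ∈ pre, EDGES.contains a = false)
    (hx : EDGES.contains x = true)
    (hsuf : ∀ a ∈ suf, EDGES.contains a = false) :
    (PySem.List.enumerate (pre ++ x :: suf) 0).filterMap
      (fun p => if EDGES.contains p.2 then some p.1 else none) = [(pre.length : Int)] := by
  rw [PySem.List.enumerate_append, List.filterMap_append, positions_none pre hpre 0,
    PySem.List.enumerate_cons]
  simp only [List.nil_append, List.filterMap_cons, hx, if_true]
  rw [positions_none suf hsuf _]
  simp

-- an EDGES token is one of 12 whitespace-free literals, so strip leaves it unchanged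
theorem strip_edge (x : String) (hx : EDGES.contains x = true) :
    PySem.Str.strip x = x := by
  simp only [EDGES, List.contains_eq_mem, decide_eq_true_eq] at hx
  fin_cases hx <;> decide

theorem join_singleton_str (x : String) : PySem.Str.join " " [x] = x := by
  simp [PySem.Str.join, PySem.Chars.join, List.intercalate]

-- the per-triplet agreement: under the Pre_ condition, A's loop step equals B's loop step
theorem triplet_agree (t : String)
    (hcnt : (parenRemoved (pySplit t " ")).countP
      (fun e => EDGES.contains e) = 1)
    (d : PySem.Dict String (PySem.Dict String String)) :
    d.insert (PySem.Str.strip (split_triplet t).1)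
      ((d.getD (PySem.Str.strip (split_triplet t).1) PySem.Dict.empty).insert
        (PySem.Str.strip (split_triplet t).2.1) (PySem.Str.strip (split_triplet t).2.2)) =
    (let elements := pySplit t " "
     let elements :=
       if elements.contains "(" then
         match PySem.List.index? elements "(", PySem.List.index? elements ")" with
         | some s, some e =>
             PySem.List.slice elements (some (0 : Int)) (some (s : Int)) ++
               PySem.List.slice elements (some ((e : Int) + 1)) none
         | _, _ => elements
       else elements
     let positions := (PySem.List.enumerate elements 0).filterMap
       (fun p => if EDGES.contains p.2 then some p.1 else none)
     if positions.length = 1 then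
       let i := (positions[0]?).getD 0
       let start := PySem.Str.strip (PySem.Str.join " " (PySem.List.slice elements none (some i)))
       let en := PySem.Str.strip (PySem.Str.join " " (PySem.List.slice elements (some (i + 1)) none))
       let edge := (PySem.List.pyGet? elements i).getD ""
       d.modify start PySem.Dict.empty (fun inner => inner.insert edge en)
     else d) := by
  obtain ⟨pre, x, suf, hdec, hx, hpre, hsuf⟩ :=
    countP_one_decomp (fun e => EDGES.contains e) _ hcnt
  have hB : (if (pySplit t " ").contains "(" then
      match PySem.List.index? (pySplit t " ") "(",
            PySem.List.index? (pySplit t " ") ")" with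
      | some s, some e =>
          PySem.List.slice (pySplit t " ") (some (0 : Int)) (some (s : Int)) ++
            PySem.List.slice (pySplit t " ") (some ((e : Int) + 1)) none
      | _, _ => pySplit t " "
    else pySplit t " ") = parenRemoved (pySplit t " ") := rfl
  have hAelems : split_triplet t =
      (PySem.Str.join " " pre, PySem.Str.join " " [x], PySem.Str.join " " suf) := by
    unfold split_triplet
    simp only [hB, hdec]
    rw [foldA_decomp pre suf x hpre hx hsuf]
  simp only [hAelems, hB, hdec, positions_decomp pre suf x hpre hx hsuf]
  simp only [List.length_cons, List.length_nil, Nat.zero_add, if_true,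
    List.getElem?_cons_zero, Option.getD_some]
  have hi : PySem.List.slice (pre ++ x :: suf) none (some ((pre.length : Nat) : Int)) = pre := by
    rw [PySem.List.slice_to_natCast]
    simp
  have hj : PySem.List.slice (pre ++ x :: suf) (some (((pre.length : Nat) : Int) + 1)) none
      = suf := by
    have h1 : ((pre.length : Nat) : Int) + 1 = (((pre.length + 1 : Nat)) : Int) := by push_cast; ring
    rw [h1, PySem.List.slice_from_natCast,
      show pre ++ x :: suf = (pre ++ [x]) ++ suf by simp,
      show pre.length + 1 = (pre ++ [x]).length by simp]
    exact List.drop_left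
  have hg : (PySem.List.pyGet? (pre ++ x :: suf) ((pre.length : Nat) : Int)).getD "" = x := by
    rw [PySem.List.pyGet?_natCast]
    simp
  rw [hi, hj, hg, join_singleton_str, strip_edge x hx]
  rfl

-- ===== VERDICT (by name: the statement is the Claim_ definition above) =====
theorem convert_map_spec : Claim_equal_convert_map := by
  intro graph _ hpre
  unfold Spec_convert_map convert_map convert_map_alt
  refine congrArg _ (congrArg _ (PySem.List.foldl_congr_mem' _ _ _ _ ?_))
  intro t ht d
  by_cases h0 : PySem.Str.strip t = ""
  · simp only [h0, if_true]
  · obtain ⟨-, hcnt⟩ := hpre t ht h0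
    simp only [if_neg h0]
    exact triplet_agree (PySem.Str.strip t) hcnt d
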